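-- pv_equiv track=rewrite | github.com/andrazrepar/terminology-alignment | main_bucc.py | isLastWordTopnMatch
-- ===== SOURCE A (Python) =====
-- def isLastWordTopnMatch(s, embedding_dict):
--     s = s.split('\t')
--     term1, term2 = s[0], s[1]
--     lastWordSource = term1.split()[-1].strip()
--     lastWordTarget = term2.split()[-1].strip()
--     try:
--         for target in embedding_dict[lastWordSource]:
--             if target == lastWordTarget:
--                 return 1
--
--         # fix for compounding problem
--         if len(term2) > 4:
--             for target in embedding_dict[lastWordSource]:
--                 if term2.endswith(target):
--                     return 1
--         return 0
--     except:
--         return 0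
-- ===== SOURCE B (Python) =====
-- def isLastWordTopnMatch(s, embedding_dict):
--     parts = s.split('\t')
--     term1, term2 = parts[0], parts[1]
--     lastWordSource = term1.split()[-1].strip()
--     lastWordTarget = term2.split()[-1].strip()
--     targets = embedding_dict.get(lastWordSource)
--     if targets is None:
--         return 0
--     check_suffix = len(term2) > 4
--     for target in targets:
--         if target == lastWordTarget or (check_suffix and term2.endswith(target)):
--             return 1
--     return 0
-- ===== Notes on version B (the rewrite author's own statement) =====
-- stated objective: simpler
-- what changed: Replaces the try/except with a None-checked dict.get and fuses A's two sequential scans over the target list (exact match, then endswith rescan) into one single-pass loop testing 'target == lastWordTarget or (len(term2) > 4 and term2.endswith(target))'.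
import Mathlib
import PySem

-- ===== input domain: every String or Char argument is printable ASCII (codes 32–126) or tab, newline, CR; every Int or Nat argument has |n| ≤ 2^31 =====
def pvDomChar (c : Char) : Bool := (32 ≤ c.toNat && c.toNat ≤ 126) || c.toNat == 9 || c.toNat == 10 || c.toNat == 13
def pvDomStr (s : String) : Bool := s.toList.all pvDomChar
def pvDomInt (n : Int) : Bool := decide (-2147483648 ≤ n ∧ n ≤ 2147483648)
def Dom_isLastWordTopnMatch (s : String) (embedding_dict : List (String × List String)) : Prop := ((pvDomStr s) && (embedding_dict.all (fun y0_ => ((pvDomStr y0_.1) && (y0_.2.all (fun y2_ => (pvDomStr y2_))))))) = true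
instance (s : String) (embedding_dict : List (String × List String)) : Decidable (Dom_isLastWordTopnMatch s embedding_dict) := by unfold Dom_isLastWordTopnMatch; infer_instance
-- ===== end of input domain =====

-- B replaces A's try/except + two sequential scans of the target list by a dict.get and one fused scan (simpler, one pass).

-- ===== PORT A =====
-- first loop of A: return 1 on exact match (some 1 = early return)
def aLoop1 (targets : List String) (lastWordTarget : String) : Option Int :=
  match targets with
  | [] => none
  | t :: rest => if t == lastWordTarget then some 1 else aLoop1 rest lastWordTarget

-- second loop of A: return 1 when term2 ends with the target
def aLoop2 (targets : List String) (term2 : String) : Option Int :=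
  match targets with
  | [] => none
  | t :: rest => if PySem.Str.endswith term2 t then some 1 else aLoop2 rest term2

def isLastWordTopnMatch (s : String) (embedding_dict : List (String × List String)) : Int :=
  let parts := (PySem.Str.split? s "\t").getD []
  match PySem.List.pyGet? parts 0, PySem.List.pyGet? parts 1 with
  | some term1, some term2 =>
    match (PySem.Str.split₀ term1).getLast?, (PySem.Str.split₀ term2).getLast? with
    | some w1, some w2 =>
      let lastWordSource := PySem.Str.strip w1
      let lastWordTarget := PySem.Str.strip w2
      match embedding_dict.find? (fun p => p.1 == lastWordSource) with
      | some (_, targets) =>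
        match aLoop1 targets lastWordTarget with
        | some r => r
        | none =>
          if 4 < PySem.Str.len term2 then
            match aLoop2 targets term2 with
            | some r => r
            | none => 0
          else 0
      | none => 0   -- KeyError, caught by the bare except
    | _, _ => 0     -- IndexError before the try: excluded by Pre_
  | _, _ => 0       -- IndexError before the try: excluded by Pre_

-- ===== PORT B =====
-- B's single fused loop
def bLoop (targets : List String) (lastWordTarget term2 : String) (checkSuffix : Bool) : Int :=
  match targets with
  | [] => 0
  | t :: rest =>
    if t == lastWordTarget || (checkSuffix && PySem.Str.endswith term2 t) then 1
    else bLoop rest lastWordTarget term2 checkSuffix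

def isLastWordTopnMatch_alt (s : String) (embedding_dict : List (String × List String)) : Int :=
  let parts := (PySem.Str.split? s "\t").getD []
  (PySem.List.pyGet? parts 0).elim 0 fun term1 =>
    (PySem.List.pyGet? parts 1).elim 0 fun term2 =>
      ((PySem.Str.split₀ term1).getLast?).elim 0 fun w1 =>
        ((PySem.Str.split₀ term2).getLast?).elim 0 fun w2 =>
          (embedding_dict.find? (fun p => p.1 == PySem.Str.strip w1)).elim 0 fun pr =>
            bLoop pr.2 (PySem.Str.strip w2) term2 (decide (4 < PySem.Str.len term2))

-- ===== PRECONDITION & SPEC =====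
-- Pre_ excludes only inputs where Python A RAISES before its try block: no tab in s
-- (s.split('\t')[1] → IndexError) or a term that is empty/whitespace-only (term.split()[-1] → IndexError).
def Pre_isLastWordTopnMatch (s : String) (_embedding_dict : List (String × List String)) : Prop :=
  2 ≤ ((PySem.Str.split? s "\t").getD []).length ∧
  PySem.Str.split₀ (((PySem.Str.split? s "\t").getD []).getD 0 "") ≠ [] ∧
  PySem.Str.split₀ (((PySem.Str.split? s "\t").getD []).getD 1 "") ≠ []
instance (s : String) (embedding_dict : List (String × List String)) : Decidable (Pre_isLastWordTopnMatch s embedding_dict) := by unfold Pre_isLastWordTopnMatch; infer_instance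

def pvWitness_isLastWordTopnMatch : String × (List (String × List String)) :=
  ("alpha beta\tgamma delta", [("beta", ["delta", "epsilon"])])

def Spec_isLastWordTopnMatch (s : String) (embedding_dict : List (String × List String)) (out : Int) : Prop := out = isLastWordTopnMatch_alt s embedding_dict
instance (s : String) (embedding_dict : List (String × List String)) (out : Int) : Decidable (Spec_isLastWordTopnMatch s embedding_dict out) := by unfold Spec_isLastWordTopnMatch; infer_instance

-- ===== CLAIM (what is proved, stated in full; the proofs are below) =====
def Claim_equal_isLastWordTopnMatch : Prop := ∀ (s : String) (embedding_dict : List (String × List String)), Dom_isLastWordTopnMatch s embedding_dict → Pre_isLastWordTopnMatch s embedding_dict → Spec_isLastWordTopnMatch s embedding_dict (isLastWordTopnMatch s embedding_dict)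

-- ===== LEMMAS AND PROOFS =====

lemma aLoop1_eq (ts : List String) (w : String) :
    aLoop1 ts w = if ts.any (· == w) then some 1 else none := by
  induction ts with
  | nil => simp [aLoop1]
  | cons t rest ih => by_cases h : t == w <;> simp [aLoop1, h, ih]

lemma aLoop2_eq (ts : List String) (t2 : String) :
    aLoop2 ts t2 = if ts.any (fun t => PySem.Str.endswith t2 t) then some 1 else none := by
  induction ts with
  | nil => simp [aLoop2]
  | cons t rest ih => cases h : PySem.Chars.endswith t2.toList t.toList <;> simp [aLoop2, h, ih]

lemma bLoop_eq (ts : List String) (w t2 : String) (c : Bool) :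
    bLoop ts w t2 c = if ts.any (fun t => t == w || (c && PySem.Str.endswith t2 t)) then 1 else 0 := by
  induction ts with
  | nil => simp [bLoop]
  | cons t rest ih =>
    cases c <;> by_cases hw : t = w <;> cases h : PySem.Chars.endswith t2.toList t.toList <;>
      simp [bLoop, hw, h, ih]

lemma any_fuse (ts : List String) (w t2 : String) (c : Bool) :
    ts.any (fun t => t == w || (c && PySem.Str.endswith t2 t)) =
      (ts.any (· == w) || (c && ts.any (fun t => PySem.Str.endswith t2 t))) := by
  induction ts with
  | nil => simp
  | cons t rest ih =>
    simp only [List.any_cons, ih]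
    cases c <;> cases t == w <;> cases PySem.Str.endswith t2 t <;> simp

lemma loops_agree (ts : List String) (w t2 : String) :
    (match aLoop1 ts w with
     | some r => r
     | none =>
       if 4 < PySem.Str.len t2 then
         match aLoop2 ts t2 with
         | some r => r
         | none => (0 : Int)
       else 0) = bLoop ts w t2 (decide (4 < PySem.Str.len t2)) := by
  rw [aLoop1_eq, aLoop2_eq, bLoop_eq, any_fuse]
  cases hA1 : ts.any (· == w) <;>
  cases hA2 : ts.any (fun t => PySem.Str.endswith t2 t) <;>
  by_cases h3 : 4 < PySem.Str.len t2 <;>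
  simp [hA1, hA2, h3] <;> simp_all


-- ===== VERDICT (by name: the statement is the Claim_ definition above) =====
theorem isLastWordTopnMatch_spec : Claim_equal_isLastWordTopnMatch := by
  intro s embedding_dict _ _
  unfold Spec_isLastWordTopnMatch isLastWordTopnMatch isLastWordTopnMatch_alt
  cases h0 : PySem.List.pyGet? ((PySem.Str.split? s "\t").getD []) 0 with
  | none => simp [h0]
  | some term1 =>
    cases h1 : PySem.List.pyGet? ((PySem.Str.split? s "\t").getD []) 1 with
    | none => simp [h0, h1]
    | some term2 =>
      cases hw1 : (PySem.Str.split₀ term1).getLast? with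
      | none => simp [h0, h1, hw1]
      | some w1 =>
        cases hw2 : (PySem.Str.split₀ term2).getLast? with
        | none => simp [h0, h1, hw1, hw2]
        | some w2 =>
          cases hf : List.find? (fun p => p.1 == PySem.Str.strip w1) embedding_dict with
          | none => simp [h0, h1, hw1, hw2, hf]
          | some pr =>
            cases pr with
            | mk k targets =>
              simp only [h0, h1, hw1, hw2, hf, Option.elim]
              exact loops_agree targets (PySem.Str.strip w2) term2
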